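-- pv_equiv track=rewrite | github.com/zjunlp/InstructCell | utils/__init__.py | find_duplicates_uppercase
-- ===== SOURCE A (Python) =====
-- from typing import (
--     Iterable,
--     List,
--     Optional,
--     Dict,
--     Any,
-- )
--
-- def find_duplicates_uppercase(inputs: Iterable[str]) -> List[bool]:
--     """Find duplicates in the input list after converting all elements to uppercase."""
--     visited = set()
--     res = []
--
--     for x in inputs:
--         x_ = x.upper()
--         if x_ in visited:
--             res.append(False)
--         else:
--             res.append(True)
--             visited.add(x_)
--
--     return res
-- ===== SOURCE B (Python) =====
-- def find_duplicates_uppercase(inputs):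
--     """Find duplicates in the input list after converting all elements to uppercase."""
--     ups = [x.upper() for x in inputs]
--     first = {}
--     for i, u in enumerate(ups):
--         first.setdefault(u, i)
--     return [first[u] == i for i, u in enumerate(ups)]
-- ===== Notes on version B (the rewrite author's own statement) =====
-- stated objective: alternative
-- what changed: Replaces the online visited-set walk by a table-build-then-index-compare decomposition: uppercase once into a list, record each string's first index with dict.setdefault, then mark position i True iff it equals the recorded first index.
import Mathlib
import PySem

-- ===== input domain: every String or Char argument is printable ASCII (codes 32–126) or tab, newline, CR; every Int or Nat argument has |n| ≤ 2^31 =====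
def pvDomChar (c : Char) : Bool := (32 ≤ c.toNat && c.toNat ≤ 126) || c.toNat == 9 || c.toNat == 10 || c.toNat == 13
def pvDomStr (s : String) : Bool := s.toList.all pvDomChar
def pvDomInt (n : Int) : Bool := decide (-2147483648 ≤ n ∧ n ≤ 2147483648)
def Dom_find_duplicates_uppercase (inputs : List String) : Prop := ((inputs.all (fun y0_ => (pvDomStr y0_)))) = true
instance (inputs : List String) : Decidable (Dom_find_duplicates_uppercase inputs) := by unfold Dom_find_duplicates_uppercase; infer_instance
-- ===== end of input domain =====

-- B replaces A's online visited-set walk by a table-build-then-index-compare decomposition (same cost, different structure).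


-- ===== PORT A =====
def find_duplicates_uppercase (inputs : List String) : List Bool :=
  (inputs.foldl (fun (st : PySem.Set String × List Bool) x =>
    let x_ := PySem.Str.upper x
    if PySem.Set.contains st.1 x_ then (st.1, st.2 ++ [false])
    else (PySem.Set.add st.1 x_, st.2 ++ [true])) (PySem.Set.empty, [])).2

-- ===== PORT B =====
def find_duplicates_uppercase_alt (inputs : List String) : List Bool :=
  let ups := inputs.map PySem.Str.upper
  let first := (PySem.List.enumerate ups 0).foldl
    (fun d p => PySem.Dict.setdefault d p.2 p.1) (PySem.Dict.empty : PySem.Dict String Int)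
  -- first[u]: the key is always present; `.getD (-1)` only totalises the lookup
  (PySem.List.enumerate ups 0).map (fun p => ((PySem.Dict.get? first p.2).getD (-1)) == p.1)

-- ===== PRECONDITION & SPEC =====
def Spec_find_duplicates_uppercase (inputs : List String) (out : List Bool) : Prop := out = find_duplicates_uppercase_alt inputs
instance (inputs : List String) (out : List Bool) : Decidable (Spec_find_duplicates_uppercase inputs out) := by unfold Spec_find_duplicates_uppercase; infer_instance

-- ===== CLAIM (what is proved, stated in full; the proofs are below) =====
def Claim_equal_find_duplicates_uppercase : Prop := ∀ (inputs : List String), Dom_find_duplicates_uppercase inputs → Spec_find_duplicates_uppercase inputs (find_duplicates_uppercase inputs)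

-- ===== LEMMAS AND PROOFS =====

-- A's loop, rebased to cons form with an explicit visited set
def pvGo (v : PySem.Set String) : List String → List Bool
  | [] => []
  | x :: xs =>
    let u := PySem.Str.upper x
    if PySem.Set.contains v u then false :: pvGo v xs
    else true :: pvGo (PySem.Set.add v u) xs

theorem pvGo_foldl (xs : List String) (v : PySem.Set String) (res : List Bool) :
    (xs.foldl (fun (st : PySem.Set String × List Bool) x =>
      let x_ := PySem.Str.upper x
      if PySem.Set.contains st.1 x_ then (st.1, st.2 ++ [false])
      else (PySem.Set.add st.1 x_, st.2 ++ [true])) (v, res)).2 = res ++ pvGo v xs := by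
  induction xs generalizing v res with
  | nil => simp [pvGo]
  | cons x xs ih =>
    simp only [List.foldl_cons, pvGo]
    by_cases h : PySem.Set.contains v (PySem.Str.upper x) = true
    · simp only [h, if_true, ih]
      simp
    · simp only [eq_false_of_ne_true h, Bool.false_eq_true, if_false, ih]
      simp

theorem pvGo_length (xs : List String) (v : PySem.Set String) : (pvGo v xs).length = xs.length := by
  induction xs generalizing v with
  | nil => rfl
  | cons x xs ih => simp only [pvGo]; split <;> simp [ih]

theorem pvGo_getElem (xs : List String) (v : PySem.Set String) (i : Nat) (h : i < xs.length) :
    (pvGo v xs)[i]'(by rw [pvGo_length]; exact h)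
      = decide ((xs.map PySem.Str.upper)[i]'(by simpa) ∉ v ∧
                (xs.map PySem.Str.upper)[i]'(by simpa) ∉ (xs.map PySem.Str.upper).take i) := by
  induction xs generalizing v i with
  | nil => simp at h
  | cons x xs ih =>
    simp only [pvGo]
    by_cases hm : PySem.Str.upper x ∈ v
    · have hc : PySem.Set.contains v (PySem.Str.upper x) = true := by
        simpa [PySem.Set.contains] using hm
      simp only [hc, if_true]
      cases i with
      | zero => simp [hm]
      | succ i =>
        have h' : i < xs.length := by simpa using h
        rw [List.getElem_cons_succ, ih v i h']
        apply decide_eq_decide.mpr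
        simp only [List.map_cons, List.take_succ_cons, List.getElem_cons_succ, List.mem_cons]
        have himp : (xs.map PySem.Str.upper)[i]'(by simpa) = PySem.Str.upper x →
            (xs.map PySem.Str.upper)[i]'(by simpa) ∈ v := fun heq => heq ▸ hm
        tauto
    · have hc : PySem.Set.contains v (PySem.Str.upper x) = false := by
        simpa [PySem.Set.contains] using hm
      simp only [hc, Bool.false_eq_true, if_false]
      have hadd : PySem.Set.add v (PySem.Str.upper x) = v ++ [PySem.Str.upper x] := by
        simp [PySem.Set.add, PySem.Set.contains, hm]
      cases i with
      | zero => simp [hm]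
      | succ i =>
        have h' : i < xs.length := by simpa using h
        rw [List.getElem_cons_succ, ih _ i h', hadd]
        apply decide_eq_decide.mpr
        simp only [List.map_cons, List.take_succ_cons, List.getElem_cons_succ, List.mem_cons,
          List.mem_append]
        tauto

-- the dict built by folding setdefault: lookup = old lookup, else first matching pair
theorem pvFold_setdefault_get (l : List (Int × String)) (d : PySem.Dict String Int) (u : String) :
    PySem.Dict.get? (l.foldl (fun d p => PySem.Dict.setdefault d p.2 p.1) d) u
      = (PySem.Dict.get? d u).or ((l.find? (fun p => p.2 == u)).map Prod.fst) := by
  induction l generalizing d with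
  | nil => simp
  | cons p l ih =>
    simp only [List.foldl_cons, ih]
    by_cases he : p.2 = u
    · subst he
      rw [PySem.Dict.get?_setdefault_self]
      cases hd : PySem.Dict.get? d p.2 <;> simp [Option.or]
    · have hne : u ≠ p.2 := fun hh => he hh.symm
      rw [PySem.Dict.get?_setdefault_of_ne d p.1 hne]
      have hb : (p.2 == u) = false := by simpa [beq_iff_eq] using he
      simp [hb]

-- first occurrence index via enumerate-find, against findIdx?
theorem pvFind_enum (us : List String) (s : Int) (u : String) :
    ((PySem.List.enumerate us s).find? (fun p => p.2 == u)).map Prod.fst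
      = (us.findIdx? (· == u)).map (fun n => s + (n : Int)) := by
  induction us generalizing s with
  | nil => simp [PySem.List.enumerate_nil]
  | cons x us ih =>
    rw [PySem.List.enumerate_cons, List.find?_cons, List.findIdx?_cons]
    by_cases he : x = u
    · simp [he]
    · have hb : (x == u) = false := by simpa [beq_iff_eq] using he
      simp only [hb, Bool.false_eq_true, if_false, ih]
      cases hf : us.findIdx? (· == u) with
      | none => simp
      | some n =>
        simp
        omega

-- findIdx? of the i-th element equals i  iff  it does not occur earlier
theorem pvFindIdx_take (us : List String) (i : Nat) (h : i < us.length) (u : String)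
    (hu : u = us[i]) :
    ((us.findIdx? (· == u)).map (fun n => ((n : Int) == (i : Int)))).getD false
      = decide (u ∉ us.take i) := by
  induction us generalizing i with
  | nil => simp at h
  | cons x us ih =>
    cases i with
    | zero =>
      have hx : u = x := by simpa using hu
      subst hx
      simp [List.findIdx?_cons]
    | succ i =>
      have h' : i < us.length := by simpa using h
      have hu' : u = us[i] := by simpa using hu
      rw [List.findIdx?_cons]
      by_cases he : x = u
      · rw [if_pos (by simpa [beq_iff_eq] using he)]
        have hmem : u ∈ (x :: us).take (i + 1) := by
          rw [List.take_succ_cons, he]; exact List.mem_cons_self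
        simp [he]
        omega
      · have hb : (x == u) = false := by simpa [beq_iff_eq] using he
        rw [hb, if_neg (by simp)]
        have hune : u ≠ x := fun hh => he hh.symm
        have hrhs : decide (u ∉ (x :: us).take (i + 1)) = decide (u ∉ us.take i) :=
          decide_eq_decide.mpr (by simp [List.take_succ_cons, hune])
        rw [hrhs, ← ih i h' hu']
        cases hf : us.findIdx? (· == u) with
        | none => simp
        | some n =>
          simp

theorem pvAlt_length (inputs : List String) :
    (find_duplicates_uppercase_alt inputs).length = inputs.length := by
  simp [find_duplicates_uppercase_alt, PySem.List.length_enumerate]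

theorem pvAlt_getElem (inputs : List String) (i : Nat) (hi : i < inputs.length) :
    (find_duplicates_uppercase_alt inputs)[i]'(by rw [pvAlt_length]; exact hi)
      = decide ((inputs.map PySem.Str.upper)[i]'(by simpa) ∉
                (inputs.map PySem.Str.upper).take i) := by
  set us := inputs.map PySem.Str.upper with hus
  have h : i < us.length := by simpa [hus] using hi
  have hlen : i < (PySem.List.enumerate us 0).length := by
    simpa [PySem.List.length_enumerate] using h
  simp only [find_duplicates_uppercase_alt, ← hus, List.getElem_map,
    PySem.List.getElem_enumerate]
  rw [pvFold_setdefault_get]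
  have hempty : PySem.Dict.get? (PySem.Dict.empty : PySem.Dict String Int) (us[i]'h) = none := by
    simp
  rw [hempty, Option.none_or, pvFind_enum]
  have hmem : us[i]'h ∈ us := List.getElem_mem h
  obtain ⟨n, hn⟩ : ∃ n, us.findIdx? (· == us[i]'h) = some n := by
    have : (us.findIdx? (· == us[i]'h)).isSome := by
      rw [List.findIdx?_isSome]
      exact List.any_of_mem hmem (by simp)
    exact Option.isSome_iff_exists.mp this
  have hkey := pvFindIdx_take us i h (us[i]'h) rfl
  rw [hn] at hkey ⊢
  simp only [show (do let a ← some n; pure ((a : Int))) = some ((n : Int)) from rfl,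
    Option.map_some, Option.getD_some] at hkey ⊢
  rw [← hkey]
  show decide _ = decide _
  exact decide_eq_decide.mpr (by omega)

-- ===== VERDICT (by name: the statement is the Claim_ definition above) =====
theorem find_duplicates_uppercase_spec : Claim_equal_find_duplicates_uppercase := by
  intro inputs _
  show find_duplicates_uppercase inputs = find_duplicates_uppercase_alt inputs
  have hA : find_duplicates_uppercase inputs = pvGo PySem.Set.empty inputs := by
    have := pvGo_foldl inputs PySem.Set.empty []
    simpa [find_duplicates_uppercase] using this
  rw [hA]
  apply List.ext_getElem (by rw [pvGo_length, pvAlt_length])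
  intro i h1 h2
  have hi : i < inputs.length := by rwa [pvGo_length] at h1
  rw [pvGo_getElem inputs PySem.Set.empty i hi, pvAlt_getElem inputs i hi]
  apply decide_eq_decide.mpr
  exact and_iff_right (List.not_mem_nil)
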